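-- pv_equiv track=rewrite | github.com/OraneD/AdventOfCode2023 | day-7/part1.py | separate_hand
-- ===== SOURCE A (Python) =====
-- def separate_hand(sorted_hand):
--     seven = [x for x in sorted_hand if x[3] == 7]
--     six = [x for x in sorted_hand if x[3] == 6]
--     five = [x for x in sorted_hand if x[3] == 5]
--     four = [x for x in sorted_hand if x[3] == 4]
--     three = [x for x in sorted_hand if x[3] == 3]
--     two = [x for x in sorted_hand if x[3] == 2]
--     one = [x for x in sorted_hand if x[3] == 1]
--     return [seven, six, five, four, three, two, one]
-- ===== SOURCE B (Python) =====
-- def separate_hand(sorted_hand):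
--     buckets = [[] for _ in range(7)]
--     for x in sorted_hand:
--         r = x[3]
--         if 1 <= r <= 7:
--             buckets[7 - r].append(x)
--     return buckets
-- ===== Notes on version B (the rewrite author's own statement) =====
-- stated objective: simpler
-- what changed: Replaces seven separate filtering passes over the list with a single pass that appends each tuple into one of seven index-computed buckets (buckets[7 - x[3]]), dropping ranks outside 1..7 exactly as A does.
import Mathlib
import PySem

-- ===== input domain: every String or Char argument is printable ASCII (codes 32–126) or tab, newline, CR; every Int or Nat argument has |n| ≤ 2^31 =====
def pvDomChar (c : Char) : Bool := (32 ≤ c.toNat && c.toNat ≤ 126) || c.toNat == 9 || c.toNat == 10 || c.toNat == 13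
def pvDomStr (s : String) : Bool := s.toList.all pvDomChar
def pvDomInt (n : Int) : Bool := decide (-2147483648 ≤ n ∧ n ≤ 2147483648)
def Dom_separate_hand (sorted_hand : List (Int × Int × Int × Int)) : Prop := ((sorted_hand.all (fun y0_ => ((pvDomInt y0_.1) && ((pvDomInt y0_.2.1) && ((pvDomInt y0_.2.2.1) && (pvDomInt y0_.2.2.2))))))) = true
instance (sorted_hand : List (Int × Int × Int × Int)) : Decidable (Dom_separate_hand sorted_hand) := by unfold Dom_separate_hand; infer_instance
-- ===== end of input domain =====

-- B replaces A's seven filtering passes with one indexed bucketing pass (objective: simpler).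
-- ===== PORT A =====
def separate_hand (sorted_hand : List (Int × Int × Int × Int)) : List (List (Int × Int × Int × Int)) :=
  let seven := sorted_hand.filter (fun x => x.2.2.2 == 7)
  let six := sorted_hand.filter (fun x => x.2.2.2 == 6)
  let five := sorted_hand.filter (fun x => x.2.2.2 == 5)
  let four := sorted_hand.filter (fun x => x.2.2.2 == 4)
  let three := sorted_hand.filter (fun x => x.2.2.2 == 3)
  let two := sorted_hand.filter (fun x => x.2.2.2 == 2)
  let one := sorted_hand.filter (fun x => x.2.2.2 == 1)
  [seven, six, five, four, three, two, one]

-- ===== PORT B =====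
-- single pass: append x to buckets[7 - x[3]] when 1 <= x[3] <= 7
def separate_hand_alt (sorted_hand : List (Int × Int × Int × Int)) : List (List (Int × Int × Int × Int)) :=
  sorted_hand.foldl
    (fun buckets x =>
      let r := x.2.2.2
      if 1 ≤ r ∧ r ≤ 7 then
        buckets.set (7 - r).toNat (buckets.getD (7 - r).toNat [] ++ [x])
      else buckets)
    [[], [], [], [], [], [], []]

-- ===== PRECONDITION & SPEC =====
def Spec_separate_hand (sorted_hand : List (Int × Int × Int × Int)) (out : List (List (Int × Int × Int × Int))) : Prop := out = separate_hand_alt sorted_hand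
instance (sorted_hand : List (Int × Int × Int × Int)) (out : List (List (Int × Int × Int × Int))) : Decidable (Spec_separate_hand sorted_hand out) := by unfold Spec_separate_hand; infer_instance

-- ===== CLAIM (what is proved, stated in full; the proofs are below) =====
def Claim_equal_separate_hand : Prop := ∀ (sorted_hand : List (Int × Int × Int × Int)), Dom_separate_hand sorted_hand → Spec_separate_hand sorted_hand (separate_hand sorted_hand)

-- ===== LEMMAS AND PROOFS =====

theorem sep_loop_inv (xs : List (Int × Int × Int × Int)) :
    ∀ (b0 b1 b2 b3 b4 b5 b6 : List (Int × Int × Int × Int)),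
    xs.foldl
      (fun buckets x =>
        let r := x.2.2.2
        if 1 ≤ r ∧ r ≤ 7 then
          buckets.set (7 - r).toNat (buckets.getD (7 - r).toNat [] ++ [x])
        else buckets)
      [b0, b1, b2, b3, b4, b5, b6] =
    [b0 ++ xs.filter (fun x => x.2.2.2 == 7),
     b1 ++ xs.filter (fun x => x.2.2.2 == 6),
     b2 ++ xs.filter (fun x => x.2.2.2 == 5),
     b3 ++ xs.filter (fun x => x.2.2.2 == 4),
     b4 ++ xs.filter (fun x => x.2.2.2 == 3),
     b5 ++ xs.filter (fun x => x.2.2.2 == 2),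
     b6 ++ xs.filter (fun x => x.2.2.2 == 1)] := by
  induction xs with
  | nil => intro b0 b1 b2 b3 b4 b5 b6; simp
  | cons x xs ih =>
    intro b0 b1 b2 b3 b4 b5 b6
    obtain ⟨a, b, c, r⟩ := x
    by_cases h : 1 ≤ r ∧ r ≤ 7
    · obtain ⟨h1, h7⟩ := h
      interval_cases r
      · exact (ih b0 b1 b2 b3 b4 b5 (b6 ++ [(a, b, c, 1)])).trans (by simp)
      · exact (ih b0 b1 b2 b3 b4 (b5 ++ [(a, b, c, 2)]) b6).trans (by simp)
      · exact (ih b0 b1 b2 b3 (b4 ++ [(a, b, c, 3)]) b5 b6).trans (by simp)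
      · exact (ih b0 b1 b2 (b3 ++ [(a, b, c, 4)]) b4 b5 b6).trans (by simp)
      · exact (ih b0 b1 (b2 ++ [(a, b, c, 5)]) b3 b4 b5 b6).trans (by simp)
      · exact (ih b0 (b1 ++ [(a, b, c, 6)]) b2 b3 b4 b5 b6).trans (by simp)
      · exact (ih (b0 ++ [(a, b, c, 7)]) b1 b2 b3 b4 b5 b6).trans (by simp)
    · have e7 : (r == (7:Int)) = false := by simp; omega
      have e6 : (r == (6:Int)) = false := by simp; omega
      have e5 : (r == (5:Int)) = false := by simp; omega
      have e4 : (r == (4:Int)) = false := by simp; omega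
      have e3 : (r == (3:Int)) = false := by simp; omega
      have e2 : (r == (2:Int)) = false := by simp; omega
      have e1 : (r == (1:Int)) = false := by simp; omega
      simp [List.foldl_cons, List.filter_cons, h, e7, e6, e5, e4, e3, e2, e1]
      exact ih b0 b1 b2 b3 b4 b5 b6

-- ===== VERDICT (by name: the statement is the Claim_ definition above) =====
theorem separate_hand_spec : Claim_equal_separate_hand := by
  intro xs _
  unfold Spec_separate_hand separate_hand separate_hand_alt
  rw [sep_loop_inv xs [] [] [] [] [] [] []]
  simp
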